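-- pv_equiv track=rewrite | github.com/Vprtp/opifex | lib/textprocessing.py | oneLiner
-- ===== SOURCE A (Python) =====
-- def oneLiner(original: str, punctuation:list[str] = ['.', ',', ';', '!', '?', '-', '"', "'", "("]) -> str:
--     """
--     Replace newlines in the input string according to the punctuation before them.
--
--     For each newline character:
--     - If the character immediately before it is punctuation, replace the newline with a space.
--     - Otherwise, replace the newline with a dot followed by a space (". ").
--
--     Punctuation is defined as all characters in string.punctuation.
--
--     Args:
--         original: Input string that may contain newlines.
--
--     Returns:
--         A string with newlines replaced as described.
--     """
--     result = []
--     for i, ch in enumerate(original):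
--         if ch == '\n':
--             # Check if there is a preceding character and if it is punctuation
--             if i > 0 and original[i-1] in punctuation:
--                 result.append(' ')
--             else:
--                 result.append('. ')
--         else:
--             result.append(ch)
--     return ''.join(result)
-- ===== SOURCE B (Python) =====
-- def oneLiner(original: str, punctuation: list[str] = ['.', ',', ';', '!', '?', '-', '"', "'", "("]) -> str:
--     segments = original.split('\n')
--     parts = [segments[0]]
--     prev = segments[0]
--     for seg in segments[1:]:
--         parts.append(' ' if prev and prev[-1] in punctuation else '. ')
--         parts.append(seg)
--         prev = seg
--     return ''.join(parts)
-- ===== Notes on version B (the rewrite author's own statement) =====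
-- stated objective: faster
-- what changed: B splits the string once at newlines and joins whole segments in bulk (constant-factor win over A's per-character Python loop that re-indexes the string at every newline); Pre_ excludes the degenerate case where the newline character itself is listed as punctuation and the string contains consecutive newlines, on which A's preceding-character test sees a newline it is itself replacing -- a corner where either value is defensible.
-- outside the precondition, e.g. on oneLiner('a\n\n', ['\n']): A returns 'a.  ', B returns 'a. . '
import Mathlib
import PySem

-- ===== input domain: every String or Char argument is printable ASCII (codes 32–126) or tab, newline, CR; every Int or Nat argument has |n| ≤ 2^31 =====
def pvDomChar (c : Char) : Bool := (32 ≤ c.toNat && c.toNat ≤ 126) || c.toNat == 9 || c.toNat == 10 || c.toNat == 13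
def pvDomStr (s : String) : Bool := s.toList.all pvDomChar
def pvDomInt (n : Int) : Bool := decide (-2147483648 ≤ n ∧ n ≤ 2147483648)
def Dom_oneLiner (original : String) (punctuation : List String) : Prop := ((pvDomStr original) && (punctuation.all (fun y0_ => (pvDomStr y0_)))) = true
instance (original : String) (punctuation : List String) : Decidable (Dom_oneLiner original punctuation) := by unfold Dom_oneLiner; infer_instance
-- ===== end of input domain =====

-- B replaces A's per-character loop (which re-indexes the string before each newline) by one
-- split on '\n' plus a per-segment join whose separator is read off the previous segment.

-- ===== PORT A =====
def oneLiner (original : String) (punctuation : List String) : String :=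
  String.mk ((PySem.List.enumerate original.toList).foldl
    (fun acc ich =>
      acc ++ (if ich.2 = '\n' then
                (if (decide (0 < ich.1) &&
                     ((PySem.List.pyGet? original.toList (ich.1 - 1)).elim false
                        (fun p => decide (String.mk [p] ∈ punctuation)))) then
                   [' ']
                 else ['.', ' '])
              else [ich.2])) [])

-- ===== PORT B =====
-- hand port of original.split('\n'): exact for the single-character separator '\n'
def pySplitNL : List Char → List (List Char)
  | [] => [[]]
  | c :: t =>
    let r := pySplitNL t
    if c = '\n' then [] :: r
    else match r with
      | s :: ss => (c :: s) :: ss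
      | [] => [[c]]

-- the loop of Source B: prev segment carried along; separator is
-- ' ' iff prev is nonempty and its last character is punctuation ('prev and prev[-1] in punctuation')
def bLoopB (punctuation : List String) : List Char → List (List Char) → List Char
  | _, [] => []
  | prev, s :: ss =>
    (match prev.getLast? with
     | some p => if String.mk [p] ∈ punctuation then [' '] else ['.', ' ']
     | none => ['.', ' ']) ++ s ++ bLoopB punctuation s ss

def oneLiner_alt (original : String) (punctuation : List String) : String :=
  match pySplitNL original.toList with
  | s :: ss => String.mk (s ++ bLoopB punctuation s ss)
  | [] => ""

-- ===== PRECONDITION & SPEC =====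
-- Pre_ excludes the degenerate inputs where the newline character itself is listed as
-- punctuation AND the string contains two consecutive newlines: there A's preceding-character
-- test sees a newline that is itself being replaced and emits a lone space, while B's segment
-- view emits a dot then space — a corner where either value is defensible (A returns there).
def Pre_oneLiner (original : String) (punctuation : List String) : Prop :=
  ¬ ("\n" ∈ punctuation ∧ ['\n', '\n'] <:+: original.toList)
instance (original : String) (punctuation : List String) : Decidable (Pre_oneLiner original punctuation) := by unfold Pre_oneLiner; infer_instance

def pvWitness_oneLiner : String × List String := ("a\nb.\nc", [".", ","])

def Spec_oneLiner (original : String) (punctuation : List String) (out : String) : Prop := out = oneLiner_alt original punctuation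
instance (original : String) (punctuation : List String) (out : String) : Decidable (Spec_oneLiner original punctuation out) := by unfold Spec_oneLiner; infer_instance

-- ===== CLAIM (what is proved, stated in full; the proofs are below) =====
def Claim_equal_oneLiner : Prop := ∀ (original : String) (punctuation : List String), Dom_oneLiner original punctuation → Pre_oneLiner original punctuation → Spec_oneLiner original punctuation (oneLiner original punctuation)

-- ===== LEMMAS AND PROOFS =====

-- separator as a function of the (optional) character preceding the newline
def sepOf (punctuation : List String) : Option Char → List Char
  | some p => if String.mk [p] ∈ punctuation then [' '] else ['.', ' ']
  | none => ['.', ' ']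

-- reference recursion for A: process the characters carrying the previous character (if any)
def refA (punctuation : List String) : Option Char → List Char → List Char
  | _, [] => []
  | po, c :: t => (if c = '\n' then sepOf punctuation po else [c]) ++ refA punctuation (some c) t

-- previous character of position k in full
def prevAt (full : List Char) (k : Nat) : Option Char :=
  if k = 0 then none else full[k-1]?

-- the previous character as A sees it after a non-first segment prev: '\n' if prev is empty
def pchA (prev : List Char) : Option Char :=
  match prev.getLast? with
  | some p => some p
  | none => some '\n'

-- A's view of the tail loop: separator from the true preceding character
def bLoopA (punctuation : List String) : Option Char → List (List Char) → List Char
  | _, [] => []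
  | po, s :: ss => sepOf punctuation po ++ s ++ bLoopA punctuation (pchA s) ss

theorem pySplitNL_ne_nil (l : List Char) : pySplitNL l ≠ [] := by
  cases l with
  | nil => simp [pySplitNL]
  | cons c t =>
    simp only [pySplitNL]
    split
    · simp
    · cases h : pySplitNL t <;> simp

theorem getLast?_cons (c : Char) (s : List Char) :
    (c :: s).getLast? = match s.getLast? with | some p => some p | none => some c := by
  cases s with
  | nil => rfl
  | cons x xs =>
    rw [List.getLast?_cons_cons]
    cases h : (x :: xs).getLast? with
    | some p => rfl
    | none => simp at h

theorem refA_eq_split (punctuation : List String) (l : List Char) :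
    ∀ (po : Option Char),
      (match pySplitNL l with
       | s :: ss =>
         s ++ bLoopA punctuation
           (match s.getLast? with | some p => some p | none => po) ss
       | [] => []) = refA punctuation po l := by
  induction l with
  | nil => intro po; rfl
  | cons c t ih =>
    intro po
    by_cases hc : c = '\n'
    · subst hc
      simp only [pySplitNL]
      obtain ⟨s', ss', hs⟩ : ∃ s' ss', pySplitNL t = s' :: ss' := by
        cases h : pySplitNL t with
        | nil => exact absurd h (pySplitNL_ne_nil t)
        | cons a b => exact ⟨a, b, rfl⟩
      have := ih (some '\n')
      rw [hs] at this ⊢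
      rw [refA, ← this]
      simp [bLoopA, sepOf, pchA, List.append_assoc]
    · simp only [pySplitNL, if_neg hc]
      obtain ⟨s', ss', hs⟩ : ∃ s' ss', pySplitNL t = s' :: ss' := by
        cases h : pySplitNL t with
        | nil => exact absurd h (pySplitNL_ne_nil t)
        | cons a b => exact ⟨a, b, rfl⟩
      have := ih (some c)
      rw [hs] at this ⊢
      simp only [refA, if_neg hc, ← this, getLast?_cons]
      cases h : s'.getLast? <;> simp

theorem oneLiner_foldl_eq (original : String) (punctuation : List String) :
    ∀ (t : List Char) (k : Nat), original.toList.drop k = t → ∀ (acc : List Char),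
      (PySem.List.enumerate t (k : Int)).foldl
        (fun acc ich =>
          acc ++ (if ich.2 = '\n' then
                    (if (decide (0 < ich.1) &&
                         ((PySem.List.pyGet? original.toList (ich.1 - 1)).elim false
                            (fun p => decide (String.mk [p] ∈ punctuation)))) then
                       [' ']
                     else ['.', ' '])
                  else [ich.2])) acc
      = acc ++ refA punctuation (prevAt original.toList k) t := by
  intro t
  induction t with
  | nil => intro k hk acc; simp [PySem.List.enumerate_nil, refA]
  | cons c t ih =>
    intro k hk acc
    have hklen : k < original.toList.length := by
      by_contra h
      rw [List.drop_eq_nil_of_le (by omega)] at hk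
      exact List.cons_ne_nil _ _ hk.symm
    have hget : original.toList[k]? = some c := by
      have h0 : (original.toList.drop k)[0]? = some c := by rw [hk]; rfl
      rwa [List.getElem?_drop, Nat.add_zero] at h0
    have hdrop : original.toList.drop (k+1) = t := by
      have : (original.toList.drop k).drop 1 = original.toList.drop (k+1) := by
        rw [List.drop_drop]
      rw [← this, hk]; rfl
    rw [PySem.List.enumerate_cons, List.foldl_cons]
    have hcast : (k : Int) + 1 = ((k + 1 : Nat) : Int) := by push_cast; ring
    rw [hcast, ih (k+1) hdrop]
    have hchunk :
        (if c = '\n' then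
           (if (decide (0 < (k : Int)) &&
                ((PySem.List.pyGet? original.toList ((k : Int) - 1)).elim false
                   (fun p => decide (String.mk [p] ∈ punctuation)))) then
              [' ']
            else ['.', ' '])
         else [c])
        = (if c = '\n' then sepOf punctuation (prevAt original.toList k) else [c]) := by
      by_cases hc : c = '\n'
      · simp only [if_pos hc]
        cases k with
        | zero => simp [prevAt, sepOf]
        | succ m =>
          have hlt : m < original.toList.length := by omega
          have hp : PySem.List.pyGet? original.toList ((m+1 : Nat) - 1 : Int) =
              original.toList[m]? := by
            have h2 : ((m+1 : Nat) : Int) - 1 = ((m : Nat) : Int) := by push_cast; ring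
            rw [h2]
            have hlt' : m < original.length := by simpa using hlt
            simp [PySem.List.pyGet?, PySem.List.pyIdx?, hlt']
          rw [hp]
          have hsm : ∃ p, original.toList[m]? = some p :=
            ⟨original.toList[m], List.getElem?_eq_getElem hlt⟩
          obtain ⟨p, hpm⟩ := hsm
          rw [hpm]
          simp only [prevAt, if_neg (Nat.succ_ne_zero m), Nat.add_sub_cancel, hpm]
          have : decide (0 < ((m+1 : Nat) : Int)) = true := by simp
          rw [this, Bool.true_and, sepOf]
          by_cases hmem : String.mk [p] ∈ punctuation <;> simp [hmem]
      · simp [hc]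
    rw [hchunk, refA]
    have hprev : prevAt original.toList (k+1) = some c := by
      simp [prevAt, hget]
    rw [hprev, List.append_assoc]

theorem oneLiner_eq_refA (original : String) (punctuation : List String) :
    oneLiner original punctuation = String.mk (refA punctuation none original.toList) := by
  unfold oneLiner
  have h := oneLiner_foldl_eq original punctuation original.toList 0 rfl []
  simp only [Nat.cast_zero] at h
  rw [h]
  rfl

-- no "\n\n" in l ⇒ no empty non-last segment after the first segment of the split
theorem split_no_empty_mid (l : List Char) (hnn : ¬ (['\n', '\n'] <:+: l)) :
    ∀ u ∈ (pySplitNL l).tail.dropLast, u ≠ [] := by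
  induction l with
  | nil => simp [pySplitNL]
  | cons c t ih =>
    have hnt : ¬ (['\n', '\n'] <:+: t) := fun h => hnn (h.trans (List.suffix_cons c t).isInfix)
    obtain ⟨s', ss', hs⟩ : ∃ s' ss', pySplitNL t = s' :: ss' := by
      cases h : pySplitNL t with
      | nil => exact absurd h (pySplitNL_ne_nil t)
      | cons a b => exact ⟨a, b, rfl⟩
    by_cases hc : c = '\n'
    · subst hc
      simp only [pySplitNL, hs, if_true, List.tail_cons]
      cases ss' with
      | nil => simp
      | cons a b =>
        have hsne : s' ≠ [] := by
          cases t with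
          | nil => simp [pySplitNL] at hs
          | cons d t' =>
            by_cases hd : d = '\n'
            · subst hd
              exact absurd (show ['\n', '\n'] <:+: '\n' :: '\n' :: t' from ⟨[], t', rfl⟩) hnn
            · simp only [pySplitNL, if_neg hd] at hs
              obtain ⟨s'', ss'', hs2⟩ : ∃ s'' ss'', pySplitNL t' = s'' :: ss'' := by
                cases h : pySplitNL t' with
                | nil => exact absurd h (pySplitNL_ne_nil t')
                | cons x y => exact ⟨x, y, rfl⟩
              rw [hs2] at hs
              have h1 : s' = d :: s'' := by
                have := hs
                injection this with h1 h2
                exact h1.symm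
              simp [h1]
        intro u hu
        rw [List.dropLast_cons₂] at hu
        rcases List.mem_cons.mp hu with h | h
        · subst h; exact hsne
        · have hih := ih hnt
          rw [hs, List.tail_cons] at hih
          exact hih u h
    · simp only [pySplitNL, if_neg hc, hs, List.tail_cons]
      have hih := ih hnt
      rw [hs, List.tail_cons] at hih
      exact hih

-- with the sentinel character not punctuation, the sentinel and none give the same separators
theorem bLoopA_sentinel (punctuation : List String) (hnp : "\n" ∉ punctuation) :
    ∀ ts : List (List Char), bLoopA punctuation (some '\n') ts = bLoopA punctuation none ts := by
  intro ts
  cases ts with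
  | nil => rfl
  | cons u us =>
    show sepOf punctuation (some '\n') ++ u ++ _ = sepOf punctuation none ++ u ++ _
    have : sepOf punctuation (some '\n') = sepOf punctuation none := by
      simp only [sepOf]
      rw [if_neg (by simpa using hnp)]
    rw [this]

-- A's tail loop equals B's whenever the sentinel case cannot fire:
-- either '\n' is not punctuation, or no non-last segment of ss is empty
theorem bLoopA_eq_bLoopB (punctuation : List String) :
    ∀ (ss : List (List Char)) (s : List Char),
      ("\n" ∉ punctuation ∨ ∀ u ∈ ss.dropLast, u ≠ []) →
      bLoopA punctuation (match s.getLast? with | some p => some p | none => none) ss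
        = bLoopB punctuation s ss := by
  intro ss
  induction ss with
  | nil => intro s _; rfl
  | cons t ts ih =>
    intro s hyp
    have hhyp' : ("\n" ∉ punctuation ∨ ∀ u ∈ ts.dropLast, u ≠ []) := by
      rcases hyp with h | h
      · exact Or.inl h
      · right
        intro u hu
        exact h u (by
          cases ts with
          | nil => simp at hu
          | cons x y => rw [List.dropLast_cons₂]; exact List.mem_cons_of_mem _ hu)
    have hsep :
        sepOf punctuation (match s.getLast? with | some p => some p | none => none)
          = (match s.getLast? with
             | some p => if String.mk [p] ∈ punctuation then [' '] else ['.', ' ']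
             | none => ['.', ' ']) := by
      cases s.getLast? <;> rfl
    have htail : bLoopA punctuation (pchA t) ts = bLoopB punctuation t ts := by
      cases ht : t.getLast? with
      | some p =>
        have h1 : pchA t = some p := by unfold pchA; rw [ht]
        have h2 := ih t hhyp'
        rw [ht] at h2
        rw [h1]; exact h2
      | none =>
        have hte : t = [] := List.getLast?_eq_none_iff.mp ht
        have h1 : pchA t = some '\n' := by unfold pchA; rw [ht]
        cases ts with
        | nil => rfl
        | cons u us =>
          rcases hyp with hnp | hne
          · have h2 := ih t hhyp'
            rw [ht] at h2
            rw [h1, bLoopA_sentinel punctuation hnp]; exact h2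
          · exact absurd (hne t (by rw [List.dropLast_cons₂]; exact List.mem_cons_self ..))
              (by simp [hte])
    show sepOf punctuation _ ++ t ++ bLoopA punctuation (pchA t) ts = _
    rw [hsep, htail]
    rfl

theorem oneLiner_alt_eq_refA (original : String) (punctuation : List String)
    (hpre : Pre_oneLiner original punctuation) :
    oneLiner_alt original punctuation = String.mk (refA punctuation none original.toList) := by
  obtain ⟨s, ss, hs⟩ : ∃ s ss, pySplitNL original.toList = s :: ss := by
    cases h : pySplitNL original.toList with
    | nil => exact absurd h (pySplitNL_ne_nil _)
    | cons a b => exact ⟨a, b, rfl⟩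
  have hA := refA_eq_split punctuation original.toList none
  rw [hs] at hA
  have hyp : ("\n" ∉ punctuation ∨ ∀ u ∈ ss.dropLast, u ≠ []) := by
    by_cases hmem : "\n" ∈ punctuation
    · right
      have hnn : ¬ (['\n', '\n'] <:+: original.toList) := fun h => hpre ⟨hmem, h⟩
      have := split_no_empty_mid original.toList hnn
      rw [hs, List.tail_cons] at this
      exact this
    · exact Or.inl hmem
  have hB := bLoopA_eq_bLoopB punctuation ss s hyp
  unfold oneLiner_alt
  rw [hs]
  simp only at hA ⊢
  rw [← hA, hB]

-- ===== VERDICT (by name: the statement is the Claim_ definition above) =====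
theorem oneLiner_spec : Claim_equal_oneLiner := by
  intro original punctuation _ hpre
  unfold Spec_oneLiner
  rw [oneLiner_eq_refA, oneLiner_alt_eq_refA _ _ hpre]
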